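-- pv_equiv track=rewrite | github.com/jazzking7/guessinggame | W_GAME/Game.py | get_best_compatible_puzzle
-- ===== SOURCE A (Python) =====
-- def count_occurrences_of_letter(puzzle, letter):
--
--
--     count = 0
--     for i in range(len(puzzle)):
--         if puzzle[i] == letter:
--             count += 1
--     return count
--
-- def check_puzzle_compatibility(puzzle, blanks, puzzle2):
--
--     if (len(puzzle) != len(puzzle2)):
--         return False
--     for index, element in enumerate(blanks):
--         if element:
--             if (puzzle[index] != puzzle2[index]):
--                 return False
--     return True
--
-- def get_best_compatible_puzzle(puzzle, blanks, letter, puzzles):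
--
--     compatibles = []
--     occurrences = []
--
--     for puz in puzzles:
--         if check_puzzle_compatibility(puzzle, blanks, puz):
--             compatibles.append(puz)
--             occurrences.append(count_occurrences_of_letter(puz, letter))
--     if len(compatibles) == 0:
--         return None
--
--     minimum = min(occurrences)
--
--     for element in compatibles:
--         if (count_occurrences_of_letter(element, letter) == minimum):
--             return element
--     return None
-- ===== SOURCE B (Python) =====
-- def get_best_compatible_puzzle(puzzle, blanks, letter, puzzles):
--     best = None
--     best_count = None
--     for puz in puzzles:
--         if len(puz) == len(puzzle) and all(puz[i] == puzzle[i] for i, b in enumerate(blanks) if b):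
--             c = sum(1 for ch in puz if ch == letter)
--             if best is None or c < best_count:
--                 best, best_count = puz, c
--     return best
-- ===== Notes on version B (the rewrite author's own statement) =====
-- stated objective: simpler
-- what changed: Replaced A's build-two-parallel-lists, take min, then rescan-and-recount structure by a single streaming pass that keeps the first compatible puzzle with the strictly smallest letter count.
import Mathlib
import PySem

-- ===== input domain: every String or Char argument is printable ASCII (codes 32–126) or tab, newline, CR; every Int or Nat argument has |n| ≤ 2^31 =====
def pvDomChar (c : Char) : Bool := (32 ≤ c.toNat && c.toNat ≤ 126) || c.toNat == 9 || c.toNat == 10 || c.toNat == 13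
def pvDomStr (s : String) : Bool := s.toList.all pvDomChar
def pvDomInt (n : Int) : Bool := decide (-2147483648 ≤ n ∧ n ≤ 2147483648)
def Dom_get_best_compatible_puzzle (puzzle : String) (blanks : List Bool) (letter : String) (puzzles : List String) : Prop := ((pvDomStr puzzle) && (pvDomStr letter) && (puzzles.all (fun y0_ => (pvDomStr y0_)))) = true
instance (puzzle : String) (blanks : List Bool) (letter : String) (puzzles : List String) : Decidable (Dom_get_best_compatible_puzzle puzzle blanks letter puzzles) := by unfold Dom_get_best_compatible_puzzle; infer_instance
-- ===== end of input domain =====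

-- B replaces A's build-two-parallel-lists / take-min / rescan-and-recount structure by one
-- streaming pass keeping the first compatible puzzle of strictly smallest letter count (objective: simpler).

-- ===== PORT A =====
-- count = 0; for i in range(len(puzzle)): if puzzle[i] == letter: count += 1
-- (puzzle[i] is a 1-character string compared to the string `letter`, ported as [c] = letter.toList)
def count_occurrences_of_letter (puz : String) (letter : String) : Int :=
  (PySem.List.pyRange 0 (PySem.List.len puz.toList) 1).foldl
    (fun count i => if [PySem.List.pyGetD puz.toList i ' '] = letter.toList then count + 1 else count) 0

-- the `for index, element in enumerate(blanks)` loop of check_puzzle_compatibility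
-- (indices are in range for every input admitted by Pre_; pyGetD's default is never read there)
def pvCheckLoop (p1 p2 : List Char) : List (Int × Bool) → Bool
  | [] => true
  | (idx, element) :: rest =>
    if element then
      if PySem.List.pyGetD p1 idx ' ' ≠ PySem.List.pyGetD p2 idx ' ' then false
      else pvCheckLoop p1 p2 rest
    else pvCheckLoop p1 p2 rest

def check_puzzle_compatibility (puzzle : String) (blanks : List Bool) (puzzle2 : String) : Bool :=
  if PySem.List.len puzzle.toList ≠ PySem.List.len puzzle2.toList then false
  else pvCheckLoop puzzle.toList puzzle2.toList (PySem.List.enumerate blanks 0)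

-- the final `for element in compatibles: if count_occurrences_of_letter(element, letter) == minimum: return element`
def pvFindLoop (letter : String) (minimum : Int) : List String → Option String
  | [] => none
  | e :: rest =>
    if count_occurrences_of_letter e letter = minimum then some e
    else pvFindLoop letter minimum rest

def get_best_compatible_puzzle (puzzle : String) (blanks : List Bool) (letter : String) (puzzles : List String) : Option String :=
  let acc := puzzles.foldl
    (fun (acc : List String × List Int) puz =>
      if check_puzzle_compatibility puzzle blanks puz then
        (acc.1 ++ [puz], acc.2 ++ [count_occurrences_of_letter puz letter])
      else acc) ([], [])
  let compatibles := acc.1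
  let occurrences := acc.2
  if compatibles.length = 0 then none
  else
    match PySem.List.min? occurrences (fun x => x) with
    | none => none   -- unreachable: occurrences is nonempty here (min() would raise only on [])
    | some minimum => pvFindLoop letter minimum compatibles

-- ===== PORT B =====
-- sum(1 for ch in puz if ch == letter)
def pvCountAlt (puz : String) (letter : String) : Int :=
  ((puz.toList.filter (fun ch => [ch] = letter.toList)).map (fun _ => (1 : Int))).sum

-- len(puz) == len(puzzle) and all(puz[i] == puzzle[i] for i, b in enumerate(blanks) if b)
def pvCompatAlt (puzzle : String) (blanks : List Bool) (puz : String) : Bool :=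
  PySem.List.len puz.toList == PySem.List.len puzzle.toList &&
  ((PySem.List.enumerate blanks 0).filter (fun ib => ib.2)).all
    (fun ib => PySem.List.pyGetD puz.toList ib.1 ' ' == PySem.List.pyGetD puzzle.toList ib.1 ' ')

-- loop body: c = …; if best is None or c < best_count: best, best_count = puz, c
def pvStep (letter : String) (st : Option String × Option Int) (puz : String) : Option String × Option Int :=
  let c := pvCountAlt puz letter
  match st.1, st.2 with
  | none, _ => (some puz, some c)
  | some _, some bc => if c < bc then (some puz, some c) else st
  | some _, none => st

def get_best_compatible_puzzle_alt (puzzle : String) (blanks : List Bool) (letter : String) (puzzles : List String) : Option String :=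
  (puzzles.foldl
    (fun st puz => if pvCompatAlt puzzle blanks puz then pvStep letter st puz else st)
    ((none : Option String), (none : Option Int))).1

-- ===== PRECONDITION & SPEC =====
-- Pre_ excludes EXACTLY the inputs on which the Python A raises IndexError: some candidate of
-- puzzle's length whose compatibility check reaches a True blank index that is out of range
-- (i.e. every earlier True blank index is in range and matches, so the loop does not return
-- False before indexing out of bounds).  On every other input A returns a value.
def Pre_get_best_compatible_puzzle (puzzle : String) (blanks : List Bool) (letter : String) (puzzles : List String) : Prop :=
  ∀ p ∈ puzzles, p.toList.length = puzzle.toList.length →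
    ∀ i : Nat, i < blanks.length → blanks.getD i false = true →
      (∀ j : Nat, j < i → blanks.getD j false = true →
          (j < puzzle.toList.length ∧ puzzle.toList.getD j ' ' = p.toList.getD j ' ')) →
      i < puzzle.toList.length
instance (puzzle : String) (blanks : List Bool) (letter : String) (puzzles : List String) : Decidable (Pre_get_best_compatible_puzzle puzzle blanks letter puzzles) := by unfold Pre_get_best_compatible_puzzle; infer_instance

def pvWitness_get_best_compatible_puzzle : String × List Bool × String × List String :=
  ("cat", [true, false, true], "a", ["cot", "bat", "cap", "no"])

def Spec_get_best_compatible_puzzle (puzzle : String) (blanks : List Bool) (letter : String) (puzzles : List String) (out : Option String) : Prop := out = get_best_compatible_puzzle_alt puzzle blanks letter puzzles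
instance (puzzle : String) (blanks : List Bool) (letter : String) (puzzles : List String) (out : Option String) : Decidable (Spec_get_best_compatible_puzzle puzzle blanks letter puzzles out) := by unfold Spec_get_best_compatible_puzzle; infer_instance

-- ===== CLAIM (what is proved, stated in full; the proofs are below) =====
def Claim_equal_get_best_compatible_puzzle : Prop := ∀ (puzzle : String) (blanks : List Bool) (letter : String) (puzzles : List String), Dom_get_best_compatible_puzzle puzzle blanks letter puzzles → Pre_get_best_compatible_puzzle puzzle blanks letter puzzles → Spec_get_best_compatible_puzzle puzzle blanks letter puzzles (get_best_compatible_puzzle puzzle blanks letter puzzles)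

-- ===== LEMMAS AND PROOFS =====

-- the two letter counters agree
theorem pvCount_eq (puz letter : String) :
    pvCountAlt puz letter = count_occurrences_of_letter puz letter := by
  unfold pvCountAlt count_occurrences_of_letter
  rw [PySem.List.foldl_pyRange_zero_pyGetD puz.toList ' '
        (fun count c => if [c] = letter.toList then count + 1 else count) 0,
      PySem.List.foldl_ite_add_one (fun c => [c] = letter.toList)]
  rw [List.countP_eq_length_filter]
  induction puz.toList with
  | nil => simp
  | cons c cs ih =>
      by_cases h : [c] = letter.toList <;> simp [h] <;> omega

-- the two compatibility checks agree
theorem pvCheckLoop_eq (p1 p2 : List Char) (l : List (Int × Bool)) :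
    pvCheckLoop p1 p2 l =
      (l.filter (fun ib => ib.2)).all
        (fun ib => PySem.List.pyGetD p2 ib.1 ' ' == PySem.List.pyGetD p1 ib.1 ' ') := by
  induction l with
  | nil => rfl
  | cons ib rest ih =>
      obtain ⟨idx, element⟩ := ib
      by_cases he : element = true
      · by_cases hc : PySem.List.pyGetD p1 idx ' ' = PySem.List.pyGetD p2 idx ' '
        · simp [pvCheckLoop, he, hc, ih]
        · simp [pvCheckLoop, he, hc]
          exact fun hx => absurd hx.symm hc
      · simp at he
        simp [pvCheckLoop, he, ih]

theorem pvCompat_eq (puzzle : String) (blanks : List Bool) (puz : String) :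
    pvCompatAlt puzzle blanks puz = check_puzzle_compatibility puzzle blanks puz := by
  by_cases h : puz.length = puzzle.length
  · simp [pvCompatAlt, check_puzzle_compatibility, pvCheckLoop_eq, h]
  · have h' : ¬ puzzle.length = puz.length := fun e => h e.symm
    simp [pvCompatAlt, check_puzzle_compatibility, h, h']

-- the running minimum never exceeds its seed
theorem pvMinFold_le (letter : String) (l : List String) (bc : Int) :
    l.foldl (fun m e => min m (count_occurrences_of_letter e letter)) bc ≤ bc := by
  induction l generalizing bc with
  | nil => simp
  | cons e rest ih =>
      simp only [List.foldl_cons]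
      exact le_trans (ih _) (min_le_left _ _)

-- B's streaming loop, once started, returns the incumbent if no strictly smaller count appears,
-- and otherwise the first element realising the running minimum — exactly A's rescan.
theorem pvStream_core (letter : String) (l : List String) (b : String) (bc : Int) :
    (l.foldl (pvStep letter) (some b, some bc)).1 =
      (if l.foldl (fun m e => min m (count_occurrences_of_letter e letter)) bc = bc
       then some b
       else pvFindLoop letter (l.foldl (fun m e => min m (count_occurrences_of_letter e letter)) bc) l) := by
  induction l generalizing b bc with
  | nil => simp
  | cons e rest ih =>
      by_cases h : pvCountAlt e letter < bc
      · have hc : count_occurrences_of_letter e letter < bc := by rwa [pvCount_eq] at h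
        have hstep : pvStep letter (some b, some bc) e = (some e, some (pvCountAlt e letter)) := by
          simp [pvStep, h]
        have hM : (e :: rest).foldl (fun m x => min m (count_occurrences_of_letter x letter)) bc
            = rest.foldl (fun m x => min m (count_occurrences_of_letter x letter))
                (count_occurrences_of_letter e letter) := by
          simp [min_eq_right (le_of_lt hc)]
        have hle := pvMinFold_le letter rest (count_occurrences_of_letter e letter)
        rw [List.foldl_cons, hstep, ih, pvCount_eq, hM]
        have hne : rest.foldl (fun m x => min m (count_occurrences_of_letter x letter))
            (count_occurrences_of_letter e letter) ≠ bc := by omega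
        simp only [hne, if_false]
        by_cases h2 : rest.foldl (fun m x => min m (count_occurrences_of_letter x letter))
            (count_occurrences_of_letter e letter) = count_occurrences_of_letter e letter
        · simp [h2, pvFindLoop]
        · simp only [h2, if_false, pvFindLoop]
          rw [if_neg (by omega)]
      · have hc : ¬ count_occurrences_of_letter e letter < bc := by rwa [pvCount_eq] at h
        have hstep : pvStep letter (some b, some bc) e = (some b, some bc) := by
          simp [pvStep, h]
        have hM : (e :: rest).foldl (fun m x => min m (count_occurrences_of_letter x letter)) bc
            = rest.foldl (fun m x => min m (count_occurrences_of_letter x letter)) bc := by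
          simp [min_eq_left (by omega : bc ≤ count_occurrences_of_letter e letter)]
        have hle := pvMinFold_le letter rest bc
        rw [List.foldl_cons, hstep, ih, hM]
        by_cases h0 : rest.foldl (fun m x => min m (count_occurrences_of_letter x letter)) bc = bc
        · simp [h0]
        · simp only [h0, if_false, pvFindLoop]
          rw [if_neg (by omega)]

-- ===== VERDICT (by name: the statement is the Claim_ definition above) =====
theorem get_best_compatible_puzzle_spec : Claim_equal_get_best_compatible_puzzle := by
  intro puzzle blanks letter puzzles _hdom _hpre
  unfold Spec_get_best_compatible_puzzle
  unfold get_best_compatible_puzzle get_best_compatible_puzzle_alt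
  simp only [pvCompat_eq]
  rw [PySem.List.foldl_if_eq_foldl_filter (check_puzzle_compatibility puzzle blanks)
        (fun (acc : List String × List Int) puz =>
          (acc.1 ++ [puz], acc.2 ++ [count_occurrences_of_letter puz letter])),
      PySem.List.foldl_if_eq_foldl_filter (check_puzzle_compatibility puzzle blanks)
        (pvStep letter),
      PySem.List.foldl_prod_mk (fun acc puz => acc ++ [puz])
        (fun acc puz => acc ++ [count_occurrences_of_letter puz letter]),
      PySem.List.foldl_append_singleton_eq_self,
      PySem.List.foldl_append_singleton_eq_map]
  cases hfil : puzzles.filter (check_puzzle_compatibility puzzle blanks) with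
  | nil => simp
  | cons e rest =>
      have hstep0 : pvStep letter (none, none) e = (some e, some (pvCountAlt e letter)) := by
        simp [pvStep]
      rw [List.foldl_cons, hstep0, pvStream_core, pvCount_eq]
      simp only [List.nil_append, List.map_cons, List.length_cons, PySem.List.min?_id_cons,
        List.foldl_map, Nat.add_one_ne_zero, if_false]
      by_cases h : rest.foldl (fun m x => min m (count_occurrences_of_letter x letter))
          (count_occurrences_of_letter e letter) = count_occurrences_of_letter e letter
      · simp [h, pvFindLoop]
      · have hle := pvMinFold_le letter rest (count_occurrences_of_letter e letter)
        simp only [h, if_false, pvFindLoop]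
        rw [if_neg (by omega)]
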